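-- pv_equiv track=rewrite | github.com/arnav-iwnl/CourseSessionPlan | scripts/app.py | distribute_content
-- ===== SOURCE A (Python) =====
-- def distribute_content(subtopics, total_hours):
--     distributed_content = []
--     subtopic_index = 0
--     for hour in range(1, total_hours + 1):
--         if subtopic_index < len(subtopics):
--             content = subtopics[subtopic_index]
--             subtopic_index += 1
--
--             # Check if we can combine with the next subtopic
--             if subtopic_index < len(subtopics) and len(content.split()) + len(subtopics[subtopic_index].split()) <= 15:
--                 content += "; " + subtopics[subtopic_index]
--                 subtopic_index += 1
--         else:
--             content = "Review and practice"
--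
--         distributed_content.append(f"Hour {hour}: {content}")
--
--     return distributed_content
-- ===== SOURCE B (Python) =====
-- def distribute_content(subtopics, total_hours):
--     # Merge the WHOLE subtopic list into chunks with one fold carrying a pending
--     # (text, word_count) pair, using word counts precomputed once; then truncate,
--     # pad with review sessions and format.
--     merged = []
--     pending = None  # (text, word_count)
--     for text, words in zip(subtopics, [len(s.split()) for s in subtopics]):
--         if pending is None:
--             pending = (text, words)
--         elif pending[1] + words <= 15:
--             merged.append(pending[0] + "; " + text)
--             pending = None
--         else:
--             merged.append(pending[0])
--             pending = (text, words)
--     if pending is not None: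
--         merged.append(pending[0])
--     n = max(total_hours, 0)
--     chunks = merged[:n]
--     chunks = chunks + ["Review and practice"] * (n - len(chunks))
--     return ["Hour {}: {}".format(i + 1, c) for i, c in enumerate(chunks)]
-- ===== Notes on version B (the rewrite author's own statement) =====
-- stated objective: alternative
-- what changed: Replaces A's per-hour index loop with look-ahead indexing and in-loop padding/formatting by a single carry-fold over (subtopic, precomputed word count) pairs that greedily merges the entire list with a pending accumulator (no indexing, no hour counter), then truncates to total_hours, pads and formats in separate passes.
import Mathlib
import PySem

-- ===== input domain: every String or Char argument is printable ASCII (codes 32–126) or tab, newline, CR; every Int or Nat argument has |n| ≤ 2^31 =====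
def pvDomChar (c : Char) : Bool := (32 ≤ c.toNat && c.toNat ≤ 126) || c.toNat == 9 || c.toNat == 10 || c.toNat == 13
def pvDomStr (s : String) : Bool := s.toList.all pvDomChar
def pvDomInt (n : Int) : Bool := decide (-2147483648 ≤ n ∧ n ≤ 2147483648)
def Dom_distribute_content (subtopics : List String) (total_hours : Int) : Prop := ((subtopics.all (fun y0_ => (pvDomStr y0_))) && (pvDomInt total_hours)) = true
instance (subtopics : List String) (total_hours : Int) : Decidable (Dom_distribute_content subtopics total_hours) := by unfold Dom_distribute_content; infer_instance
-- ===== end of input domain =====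

-- B replaces A's per-hour index loop by one carry-fold over (subtopic, precomputed
-- word count) pairs that merges the whole list, then truncates, pads and formats;
-- objective: alternative decomposition, same cost.

-- ===== PORT A =====
-- loop body of A's for-loop: state = (accumulated lines, subtopic index)
def dcBodyA (subtopics : List String) (st : List String × Nat) (hour : Int) : List String × Nat :=
  let acc := st.1
  let idx := st.2
  if idx < subtopics.length then
    let content := subtopics.getD idx ""
    let idx := idx + 1
    if idx < subtopics.length ∧
        (PySem.Str.split₀ content).length + (PySem.Str.split₀ (subtopics.getD idx "")).length ≤ 15 then
      (acc ++ ["Hour " ++ PySem.Int.toStr hour ++ ": " ++ (content ++ "; " ++ subtopics.getD idx "")], idx + 1)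
    else
      (acc ++ ["Hour " ++ PySem.Int.toStr hour ++ ": " ++ content], idx)
  else
    (acc ++ ["Hour " ++ PySem.Int.toStr hour ++ ": " ++ "Review and practice"], idx)

def distribute_content (subtopics : List String) (total_hours : Int) : List String :=
  ((PySem.List.pyRange 1 (total_hours + 1) 1).foldl (dcBodyA subtopics) ([], 0)).1

-- ===== PORT B =====
-- one step of Source B's for-loop: state = (merged list, pending carry)
def dcFoldStep (st : List String × Option (String × Nat)) (p : String × Nat) : List String × Option (String × Nat) :=
  match st with
  | (merged, none) => (merged, some p)
  | (merged, some (t, cnt)) =>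
      if cnt + p.2 ≤ 15 then (merged ++ [t ++ "; " ++ p.1], none)
      else (merged ++ [t], some p)

-- the final 'if pending is not None: merged.append(pending[0])'
def dcFlush (st : List String × Option (String × Nat)) : List String :=
  match st with
  | (merged, none) => merged
  | (merged, some (t, _)) => merged ++ [t]

def distribute_content_alt (subtopics : List String) (total_hours : Int) : List String :=
  let merged := dcFlush ((subtopics.zip (subtopics.map (fun s => (PySem.Str.split₀ s).length))).foldl dcFoldStep ([], none))
  let n := (max total_hours 0).toNat    -- n = max(total_hours, 0) ≥ 0, so merged[:n] is List.take n (exact)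
  let chunks := merged.take n
  let chunks := chunks ++ List.replicate (n - chunks.length) "Review and practice"
  (PySem.List.enumerate chunks 0).map (fun p => "Hour " ++ PySem.Int.toStr (p.1 + 1) ++ ": " ++ p.2)

-- ===== PRECONDITION & SPEC =====
def Spec_distribute_content (subtopics : List String) (total_hours : Int) (out : List String) : Prop := out = distribute_content_alt subtopics total_hours
instance (subtopics : List String) (total_hours : Int) (out : List String) : Decidable (Spec_distribute_content subtopics total_hours out) := by unfold Spec_distribute_content; infer_instance

-- ===== CLAIM (what is proved, stated in full; the proofs are below) =====
def Claim_equal_distribute_content : Prop := ∀ (subtopics : List String) (total_hours : Int), Dom_distribute_content subtopics total_hours → Spec_distribute_content subtopics total_hours (distribute_content subtopics total_hours)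

-- ===== LEMMAS AND PROOFS =====

def dcWc (s : String) : Nat := (PySem.Str.split₀ s).length

-- structural specification of B's merging fold: greedy merge of the whole list
def dcMerge : List String → List String
  | [] => []
  | [x] => [x]
  | x :: y :: r =>
      if dcWc x + dcWc y ≤ 15 then (x ++ "; " ++ y) :: dcMerge r
      else x :: dcMerge (y :: r)

-- one iteration of A's loop as a (content, next index) step
def dcStep (subtopics : List String) (idx : Nat) : String × Nat :=
  if idx < subtopics.length then
    let content := subtopics.getD idx ""
    if idx + 1 < subtopics.length ∧
        (PySem.Str.split₀ content).length + (PySem.Str.split₀ (subtopics.getD (idx + 1) "")).length ≤ 15 then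
      (content ++ "; " ++ subtopics.getD (idx + 1) "", idx + 2)
    else (content, idx + 1)
  else ("Review and practice", idx)

-- the contents A produces over n hours starting at subtopic index idx
def dcSeq (subtopics : List String) : Nat → Nat → List String
  | 0, _ => []
  | n + 1, idx => (dcStep subtopics idx).1 :: dcSeq subtopics n (dcStep subtopics idx).2

-- the non-filler contents A produces: fuel n, index idx
def dcChunks (subtopics : List String) : Nat → Nat → List String
  | 0, _ => []
  | n + 1, idx =>
    if idx < subtopics.length then
      let content := subtopics.getD idx ""
      if idx + 1 < subtopics.length ∧
          (PySem.Str.split₀ content).length + (PySem.Str.split₀ (subtopics.getD (idx + 1) "")).length ≤ 15 then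
        (content ++ "; " ++ subtopics.getD (idx + 1) "") :: dcChunks subtopics n (idx + 2)
      else
        content :: dcChunks subtopics n (idx + 1)
    else []

-- formatting pass with explicit hour counter
def dcFmt (h : Int) : List String → List String
  | [] => []
  | c :: cs => ("Hour " ++ PySem.Int.toStr h ++ ": " ++ c) :: dcFmt (h + 1) cs

lemma loopA_eq (subtopics : List String) :
    ∀ (n : Nat) (h0 : Int) (idx : Nat) (acc : List String),
      ((PySem.List.pyRange h0 (h0 + n) 1).foldl (dcBodyA subtopics) (acc, idx)).1
        = acc ++ dcFmt h0 (dcSeq subtopics n idx) := by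
  intro n
  induction n with
  | zero =>
      intro h0 idx acc
      rw [show h0 + ((0 : Nat) : Int) = h0 by omega, PySem.List.pyRange_one_eq_nil (le_refl h0)]
      simp [dcSeq, dcFmt]
  | succ n ih =>
      intro h0 idx acc
      rw [PySem.List.pyRange_one_cons (by omega : h0 < h0 + ((n + 1 : Nat) : Int)),
          show h0 + ((n + 1 : Nat) : Int) = (h0 + 1) + (n : Int) by push_cast; ring]
      have hbody : dcBodyA subtopics (acc, idx) h0
          = (acc ++ ["Hour " ++ PySem.Int.toStr h0 ++ ": " ++ (dcStep subtopics idx).1],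
             (dcStep subtopics idx).2) := by
        simp only [dcBodyA, dcStep]
        split_ifs <;> simp
      rw [List.foldl_cons, hbody, ih]
      simp [dcSeq, dcFmt]

lemma dcSeq_out (subtopics : List String) :
    ∀ (n idx : Nat), ¬ idx < subtopics.length →
      dcSeq subtopics n idx = List.replicate n "Review and practice" := by
  intro n
  induction n with
  | zero => intro idx _; rfl
  | succ n ih =>
      intro idx h
      have hs : dcStep subtopics idx = ("Review and practice", idx) := by
        simp [dcStep, h]
      simp [dcSeq, hs, ih idx h, List.replicate_succ]

lemma dcSeq_eq_chunks_pad (subtopics : List String) :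
    ∀ (n idx : Nat),
      dcSeq subtopics n idx
        = dcChunks subtopics n idx
            ++ List.replicate (n - (dcChunks subtopics n idx).length) "Review and practice" := by
  intro n
  induction n with
  | zero => intro idx; rfl
  | succ n ih =>
      intro idx
      by_cases h : idx < subtopics.length
      · by_cases hm1 : idx + 1 < subtopics.length
        · have e1 : subtopics.getD idx "" = subtopics[idx] := List.getD_eq_getElem _ _ h
          have e2 : subtopics.getD (idx + 1) "" = subtopics[idx + 1] :=
            List.getD_eq_getElem _ _ hm1
          by_cases hm2 : (PySem.Str.split₀ subtopics[idx]).length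
              + (PySem.Str.split₀ subtopics[idx + 1]).length ≤ 15
          · have hs : dcStep subtopics idx
                = (subtopics[idx] ++ "; " ++ subtopics[idx + 1], idx + 2) := by
              simp [dcStep, h, hm1, hm2]
            simp [dcSeq, dcChunks, h, hm1, hm2, hs, ih (idx + 2)]
          · have hs : dcStep subtopics idx = (subtopics[idx], idx + 1) := by
              simp [dcStep, h, hm1, hm2]
            simp [dcSeq, dcChunks, h, hm1, hm2, hs, ih (idx + 1)]
        · have hs : dcStep subtopics idx = (subtopics.getD idx "", idx + 1) := by
            simp [dcStep, h, hm1]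
          simp [dcSeq, dcChunks, h, hm1, hs, ih (idx + 1)]
      · rw [dcSeq_out subtopics (n + 1) idx h]
        simp [dcChunks, h]

-- A's chunk stream with fuel n is exactly the first n chunks of the full greedy merge
lemma dcChunks_eq_take (subtopics : List String) :
    ∀ (n idx : Nat), dcChunks subtopics n idx = (dcMerge (subtopics.drop idx)).take n := by
  intro n
  induction n with
  | zero => intro idx; simp [dcChunks]
  | succ n ih =>
      intro idx
      by_cases h : idx < subtopics.length
      · have hd : subtopics.drop idx = subtopics[idx] :: subtopics.drop (idx + 1) :=
          List.drop_eq_getElem_cons h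
        have e1 : subtopics.getD idx "" = subtopics[idx] := List.getD_eq_getElem _ _ h
        by_cases hm1 : idx + 1 < subtopics.length
        · have hd1 : subtopics.drop (idx + 1) = subtopics[idx + 1] :: subtopics.drop (idx + 2) :=
            List.drop_eq_getElem_cons hm1
          have e2 : subtopics.getD (idx + 1) "" = subtopics[idx + 1] :=
            List.getD_eq_getElem _ _ hm1
          by_cases hm2 : (PySem.Str.split₀ subtopics[idx]).length
              + (PySem.Str.split₀ subtopics[idx + 1]).length ≤ 15
          · have hL : dcChunks subtopics (n + 1) idx
                = (subtopics[idx] ++ "; " ++ subtopics[idx + 1]) :: dcChunks subtopics n (idx + 2) := by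
              simp [dcChunks, h, hm1, hm2]
            have hR : dcMerge (subtopics.drop idx)
                = (subtopics[idx] ++ "; " ++ subtopics[idx + 1]) :: dcMerge (subtopics.drop (idx + 2)) := by
              rw [hd, hd1]
              simp only [dcMerge]
              rw [if_pos (by simpa [dcWc] using hm2)]
            rw [hL, hR, List.take_succ_cons, ih]
          · have hL : dcChunks subtopics (n + 1) idx
                = subtopics[idx] :: dcChunks subtopics n (idx + 1) := by
              simp [dcChunks, h, hm1, hm2]
            have hR : dcMerge (subtopics.drop idx)
                = subtopics[idx] :: dcMerge (subtopics.drop (idx + 1)) := by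
              rw [hd, hd1]
              simp only [dcMerge]
              rw [if_neg (by simpa [dcWc] using hm2), ← hd1]
            rw [hL, hR, List.take_succ_cons, ih]
        · have hd1 : subtopics.drop (idx + 1) = [] := by
            rw [List.drop_eq_nil_iff]; omega
          have hL : dcChunks subtopics (n + 1) idx
              = subtopics[idx] :: dcChunks subtopics n (idx + 1) := by
            simp [dcChunks, h, hm1]
          rw [hL, hd, hd1, ih, hd1]
          simp [dcMerge]
      · have hd : subtopics.drop idx = [] := by rw [List.drop_eq_nil_iff]; omega
        simp [dcChunks, h, hd, dcMerge]

-- B's carry-fold computes the full greedy merge (strong induction on list length)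
lemma fold_none_aux (subtopics : List String) :
    ∀ (k : Nat) (l : List String), l.length ≤ k → ∀ (acc : List String),
      dcFlush ((l.zip (l.map dcWc)).foldl dcFoldStep (acc, none)) = acc ++ dcMerge l := by
  intro k
  induction k with
  | zero =>
      intro l hl acc
      have : l = [] := List.eq_nil_of_length_eq_zero (by omega)
      subst this; simp [dcFlush, dcMerge]
  | succ k ih =>
      intro l hl acc
      match l with
      | [] => simp [dcFlush, dcMerge]
      | [x] => simp [dcFoldStep, dcFlush, dcMerge]
      | x :: y :: ys =>
          by_cases hm : dcWc x + dcWc y ≤ 15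
          · have : ((x :: y :: ys).zip ((x :: y :: ys).map dcWc)).foldl dcFoldStep (acc, none)
                = (ys.zip (ys.map dcWc)).foldl dcFoldStep (acc ++ [x ++ "; " ++ y], none) := by
              simp [dcFoldStep, hm]
            rw [this, ih ys (by simp at hl ⊢; omega) (acc ++ [x ++ "; " ++ y])]
            simp [dcMerge, hm]
          · have : ((x :: y :: ys).zip ((x :: y :: ys).map dcWc)).foldl dcFoldStep (acc, none)
                = ((y :: ys).zip ((y :: ys).map dcWc)).foldl dcFoldStep (acc ++ [x], none) := by
              simp [dcFoldStep, hm]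
            rw [this, ih (y :: ys) (by simp at hl ⊢; omega) (acc ++ [x])]
            simp [dcMerge, hm]

lemma enum_fmt (l : List String) :
    ∀ (s : Int),
      (PySem.List.enumerate l s).map (fun p => "Hour " ++ PySem.Int.toStr (p.1 + 1) ++ ": " ++ p.2)
        = dcFmt (s + 1) l := by
  induction l with
  | nil => intro s; simp [PySem.List.enumerate_nil, dcFmt]
  | cons c cs ih => intro s; simp [PySem.List.enumerate_cons, dcFmt, ih (s + 1)]

lemma dc_eq (subtopics : List String) (total_hours : Int) :
    distribute_content subtopics total_hours = distribute_content_alt subtopics total_hours := by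
  have hA : distribute_content subtopics total_hours
      = dcFmt 1 (dcSeq subtopics total_hours.toNat 0) := by
    unfold distribute_content
    by_cases h : 0 ≤ total_hours
    · rw [show total_hours + 1 = (1 : Int) + (total_hours.toNat : Int) by omega]
      exact loopA_eq subtopics total_hours.toNat 1 0 []
    · rw [PySem.List.pyRange_one_eq_nil (by omega : total_hours + 1 ≤ 1),
          show total_hours.toNat = 0 by omega]
      rfl
  have hB : dcFlush ((subtopics.zip (subtopics.map (fun s => (PySem.Str.split₀ s).length))).foldl dcFoldStep ([], none))
      = dcMerge subtopics :=
    fold_none_aux subtopics subtopics.length subtopics (le_refl _) []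
  rw [hA, dcSeq_eq_chunks_pad, dcChunks_eq_take]
  unfold distribute_content_alt
  rw [enum_fmt]
  rw [hB, show (max total_hours 0).toNat = total_hours.toNat by omega]
  norm_num

-- ===== VERDICT (by name: the statement is the Claim_ definition above) =====
theorem distribute_content_spec : Claim_equal_distribute_content := by
  intro subtopics total_hours _
  exact dc_eq subtopics total_hours
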